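-- pv_equiv track=rewrite | github.com/PhooPyae/data_structure_and_algorithms | Steps.py | steps_v1
-- ===== SOURCE A (Python) =====
-- def steps_v1(size):
--     stair = ''
--     for row in range(size):
--         for column in range(size):
--             if column <= row:
--                 stair = stair + "#"
--             else:
--                 stair = stair + 's'
--         stair = stair + '\n'
--     return stair
-- ===== SOURCE B (Python) =====
-- def steps_v1(size):
--     return ''.join('#' * (row + 1) + 's' * (size - row - 1) + '\n' for row in range(size))
-- ===== Notes on version B (the rewrite author's own statement) =====
-- stated objective: idiomatic
-- what changed: Replaces the nested per-cell loop and branch with a closed-form per-row construction using string repetition ('#'*(row+1) + 's'*(size-row-1)), joined in one pass.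
import Mathlib
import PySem

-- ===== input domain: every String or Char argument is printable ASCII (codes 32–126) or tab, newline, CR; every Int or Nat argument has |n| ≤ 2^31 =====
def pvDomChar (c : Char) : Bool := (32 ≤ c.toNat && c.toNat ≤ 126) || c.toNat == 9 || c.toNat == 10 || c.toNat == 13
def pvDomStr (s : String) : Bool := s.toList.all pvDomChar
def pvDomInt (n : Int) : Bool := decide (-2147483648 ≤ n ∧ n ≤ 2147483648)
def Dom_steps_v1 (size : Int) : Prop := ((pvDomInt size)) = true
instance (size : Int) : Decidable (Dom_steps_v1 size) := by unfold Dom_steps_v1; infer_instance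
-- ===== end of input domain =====

-- B replaces A's per-cell inner loop and branch with closed-form '#'*(row+1) + 's'*(size-row-1) per row, joined in one pass.

-- ===== PORT A =====
-- literal port of A: nested loops over range(size), character-by-character append (on List Char, the PySem string carrier)
def steps_v1 (size : Int) : String :=
  String.ofList <|
    (PySem.List.pyRange 0 size 1).foldl
      (fun stair row =>
        ((PySem.List.pyRange 0 size 1).foldl
          (fun st column => if column ≤ row then st ++ ['#'] else st ++ ['s']) stair) ++ ['\n'])
      []

-- ===== PORT B =====
-- literal port of B: ''.join('#'*(row+1) + 's'*(size-row-1) + '\n' for row in range(size))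
def steps_v1_alt (size : Int) : String :=
  String.ofList <|
    ((PySem.List.pyRange 0 size 1).map
      (fun row => List.replicate (row + 1).toNat '#' ++ List.replicate (size - row - 1).toNat 's' ++ ['\n'])).flatten

-- ===== PRECONDITION & SPEC =====
def Spec_steps_v1 (size : Int) (out : String) : Prop := out = steps_v1_alt size
instance (size : Int) (out : String) : Decidable (Spec_steps_v1 size out) := by unfold Spec_steps_v1; infer_instance

-- ===== CLAIM (what is proved, stated in full; the proofs are below) =====
def Claim_equal_steps_v1 : Prop := ∀ (size : Int), Dom_steps_v1 size → Spec_steps_v1 size (steps_v1 size)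

-- ===== LEMMAS AND PROOFS =====

-- A's inner column loop produces exactly B's closed-form row content.
theorem steps_inner_row (size row : Int) (h0 : 0 ≤ row) (h1 : row < size) (st : List Char) :
    (PySem.List.pyRange 0 size 1).foldl
        (fun st column => if column ≤ row then st ++ ['#'] else st ++ ['s']) st
      = st ++ (List.replicate (row + 1).toNat '#' ++ List.replicate (size - row - 1).toNat 's') := by
  have hA : ∀ init : List Char,
      List.foldl (fun st column => if column ≤ row then st ++ ['#'] else st ++ ['s']) init
        (PySem.List.pyRange 0 (row + 1) 1)
      = init ++ List.replicate (row + 1).toNat '#' := by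
    intro init
    rw [PySem.List.foldl_congr_mem (l := PySem.List.pyRange 0 (row + 1) 1) (init := init)
          (f := fun st column => if column ≤ row then st ++ ['#'] else st ++ ['s'])
          (g := fun st _ => st ++ ['#'])
          (fun acc x hx => by
            rcases (PySem.List.mem_pyRange_one).1 hx with ⟨_, hlt⟩
            simp [show x ≤ row by omega])]
    rw [PySem.List.foldl_append_singleton_eq_map (f := fun _ => '#')]
    simp [List.map_const', PySem.List.length_pyRange_one]
  have hB : ∀ init : List Char,
      List.foldl (fun st column => if column ≤ row then st ++ ['#'] else st ++ ['s']) init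
        (PySem.List.pyRange (row + 1) size 1)
      = init ++ List.replicate (size - row - 1).toNat 's' := by
    intro init
    rw [PySem.List.foldl_congr_mem (l := PySem.List.pyRange (row + 1) size 1) (init := init)
          (f := fun st column => if column ≤ row then st ++ ['#'] else st ++ ['s'])
          (g := fun st _ => st ++ ['s'])
          (fun acc x hx => by
            rcases (PySem.List.mem_pyRange_one).1 hx with ⟨hge, _⟩
            simp [show ¬ x ≤ row by omega])]
    rw [PySem.List.foldl_append_singleton_eq_map (f := fun _ => 's')]
    simp [List.map_const', PySem.List.length_pyRange_one]
    omega
  rw [PySem.List.pyRange_one_append 0 (row + 1) size (by omega) (by omega), List.foldl_append,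
      hA, hB, List.append_assoc]

-- A's outer loop, run over any sub-range of rows of range(size), appends B's rows.
theorem steps_outer (size : Int) (l : List Int)
    (hl : ∀ r ∈ l, 0 ≤ r ∧ r < size) (init : List Char) :
    l.foldl
        (fun stair row =>
          ((PySem.List.pyRange 0 size 1).foldl
            (fun st column => if column ≤ row then st ++ ['#'] else st ++ ['s']) stair) ++ ['\n'])
        init
      = init ++ (l.map
          (fun row => List.replicate (row + 1).toNat '#' ++ List.replicate (size - row - 1).toNat 's' ++ ['\n'])).flatten := by
  induction l generalizing init with
  | nil => simp
  | cons r rs ih =>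
      have hr := hl r (by simp)
      simp only [List.foldl_cons, List.map_cons, List.flatten_cons]
      rw [steps_inner_row size r hr.1 hr.2 init,
          ih (fun x hx => hl x (by simp [hx]))]
      simp [List.append_assoc]

-- ===== VERDICT (by name: the statement is the Claim_ definition above) =====
theorem steps_v1_spec : Claim_equal_steps_v1 := by
  intro size _
  unfold Spec_steps_v1 steps_v1 steps_v1_alt
  rw [steps_outer size _ (fun r hr => (PySem.List.mem_pyRange_one).1 hr) []]
  simp
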